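-- pv_equiv track=rewrite | github.com/KIT-TVA/qc-configuration-problem | configproblem/qaoa/qaoa_mincost_k_sat.py | convert_ancilla_bit_results
-- ===== SOURCE A (Python) =====
-- from typing import Any
--
-- def convert_ancilla_bit_results(results: dict[str, Any], nfeatures: int) -> dict[str, Any]:
--     """
--         Converts the results from the quantum computer to the results for the original problem
--
--         :param results: The results from the quantum computer
--         :param nfeatures: The number of features used in the problem
--     """
--     new_results = {}
--     for key, value in results.items():
--         new_key = key[-nfeatures:]
--         if new_key in new_results:
--             new_results[new_key] += value
--         else:
--             new_results[new_key] = value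
--     return new_results
-- ===== SOURCE B (Python) =====
-- def convert_ancilla_bit_results(results, nfeatures):
--     # Two staged passes, no accumulator dict: first list the distinct suffixes
--     # in first-occurrence order, then sum each suffix's values by scanning.
--     items = [(key[-nfeatures:], value) for key, value in results.items()]
--     order = []
--     for s, _ in items:
--         if s not in order:
--             order.append(s)
--     return {s: sum(v for t, v in items if t == s) for s in order}
-- ===== Notes on version B (the rewrite author's own statement) =====
-- stated objective: alternative
-- what changed: Replaces A's single streaming pass with a dict of running totals by a dict-free two-stage scheme: one pass lists the distinct suffixes in first-occurrence order, then each suffix's total is obtained by a fresh scan over the items, a nested-scan group-by instead of an accumulator dict.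
import Mathlib
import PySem

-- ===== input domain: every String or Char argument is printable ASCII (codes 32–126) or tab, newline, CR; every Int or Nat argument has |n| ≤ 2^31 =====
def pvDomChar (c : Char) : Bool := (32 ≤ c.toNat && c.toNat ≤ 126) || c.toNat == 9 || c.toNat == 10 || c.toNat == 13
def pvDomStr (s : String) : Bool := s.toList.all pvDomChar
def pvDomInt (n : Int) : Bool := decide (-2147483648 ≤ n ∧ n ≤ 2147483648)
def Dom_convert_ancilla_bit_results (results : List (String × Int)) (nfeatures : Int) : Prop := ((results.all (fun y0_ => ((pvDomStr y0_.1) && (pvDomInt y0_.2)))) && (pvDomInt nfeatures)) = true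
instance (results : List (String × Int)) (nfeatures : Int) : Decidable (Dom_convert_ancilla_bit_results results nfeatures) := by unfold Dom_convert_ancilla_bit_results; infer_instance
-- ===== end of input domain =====

-- B replaces A's streaming running-total dict by a dict-free two-stage group-by:
-- list the distinct suffixes in first-occurrence order, then sum each by a fresh scan; objective: alternative.


-- ===== PORT A =====
-- literal port: single pass, dict accumulator with membership test
def convert_ancilla_bit_results (results : List (String × Int)) (nfeatures : Int) : List (String × Int) :=
  (results.foldl (fun new_results kv =>
      let new_key := PySem.Str.slice kv.1 (some (-nfeatures)) none
      if new_results.contains new_key then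
        new_results.modify new_key 0 (· + kv.2)
      else
        new_results.insert new_key kv.2)
    (PySem.Dict.empty : PySem.Dict String Int)).items

-- ===== PORT B =====
-- literal port of Source B: distinct suffixes in first-occurrence order, then a fresh
-- summation scan per suffix (sum of a filtered generator)
def convert_ancilla_bit_results_alt (results : List (String × Int)) (nfeatures : Int) : List (String × Int) :=
  let items := results.map (fun kv => (PySem.Str.slice kv.1 (some (-nfeatures)) none, kv.2))
  let order : PySem.Set String := items.foldl (fun order p => PySem.Set.add order p.1) PySem.Set.empty
  order.map (fun s => (s, ((items.filter (fun t => t.1 == s)).map (fun t => t.2)).sum))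

-- ===== PRECONDITION & SPEC =====
def Spec_convert_ancilla_bit_results (results : List (String × Int)) (nfeatures : Int) (out : List (String × Int)) : Prop := out = convert_ancilla_bit_results_alt results nfeatures
instance (results : List (String × Int)) (nfeatures : Int) (out : List (String × Int)) : Decidable (Spec_convert_ancilla_bit_results results nfeatures out) := by unfold Spec_convert_ancilla_bit_results; infer_instance

-- ===== CLAIM (what is proved, stated in full; the proofs are below) =====
def Claim_equal_convert_ancilla_bit_results : Prop := ∀ (results : List (String × Int)) (nfeatures : Int), Dom_convert_ancilla_bit_results results nfeatures → Spec_convert_ancilla_bit_results results nfeatures (convert_ancilla_bit_results results nfeatures)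

-- ===== LEMMAS AND PROOFS =====

-- A's loop body as a function of the (suffix, value) pair
def pvStep (d : PySem.Dict String Int) (p : String × Int) : PySem.Dict String Int :=
  if d.contains p.1 then d.modify p.1 0 (· + p.2) else d.insert p.1 p.2

theorem pvStep_eq (d : PySem.Dict String Int) (p : String × Int) :
    pvStep d p = d.insert p.1 (d.getD p.1 0 + p.2) := by
  unfold pvStep PySem.Dict.modify
  by_cases h : d.contains p.1
  · simp [h]
  · simp only [Bool.not_eq_true] at h
    rw [PySem.Dict.getD_of_not_contains _ _ h, zero_add]
    simp [h]

theorem pvFoldl_add_shift (l : List (String × Int)) (a : Int) :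
    l.foldl (fun a t => a + t.2) a = a + l.foldl (fun a t => a + t.2) 0 := by
  induction l generalizing a with
  | nil => simp
  | cons p t ih => simp only [List.foldl_cons]; rw [ih, ih (0 + p.2)]; ring

theorem pvGetD_fold (l : List (String × Int)) (d : PySem.Dict String Int) (s : String) :
    (l.foldl (fun d p => d.insert p.1 (d.getD p.1 0 + p.2)) d).getD s 0
      = d.getD s 0 + (l.filter (fun t => t.1 == s)).foldl (fun a t => a + t.2) 0 := by
  induction l generalizing d with
  | nil => simp
  | cons p t ih =>
    simp only [List.foldl_cons, List.filter_cons]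
    rw [ih]
    by_cases h : p.1 = s
    · subst h
      simp only [beq_self_eq_true, if_pos, List.foldl_cons]
      rw [PySem.Dict.getD_insert_self,
        pvFoldl_add_shift (List.filter (fun t => t.1 == p.1) t) (0 + p.2)]
      ring
    · have hb : (p.1 == s) = false := by simpa using h
      simp only [hb, Bool.false_eq_true, if_false]
      rw [PySem.Dict.getD_insert_of_ne _ _ _ (fun hsk => h hsk.symm)]

theorem pvFoldl_add_eq_sum (l : List (String × Int)) :
    l.foldl (fun a t => a + t.2) 0 = (l.map (fun t => t.2)).sum := by
  induction l with
  | nil => simp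
  | cons p t ih =>
    simp only [List.foldl_cons, List.map_cons, List.sum_cons]
    rw [pvFoldl_add_shift, ih]; ring

theorem convert_A_eq (results : List (String × Int)) (nfeatures : Int) :
    convert_ancilla_bit_results results nfeatures
      = convert_ancilla_bit_results_alt results nfeatures := by
  unfold convert_ancilla_bit_results convert_ancilla_bit_results_alt
  set f : String × Int → String × Int :=
    fun kv => (PySem.Str.slice kv.1 (some (-nfeatures)) none, kv.2) with hf
  set pairs := results.map f with hpairs
  -- A side: the loop is a fold of pvStep over pairs; rewrite it to insert form
  have hstepA : (fun (d : PySem.Dict String Int) (kv : String × Int) =>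
      let new_key := PySem.Str.slice kv.1 (some (-nfeatures)) none
      if d.contains new_key then d.modify new_key 0 (· + kv.2)
      else d.insert new_key kv.2)
    = fun d kv => pvStep d (f kv) := rfl
  rw [hstepA]
  rw [show results.foldl (fun d kv => pvStep d (f kv)) PySem.Dict.empty
      = pairs.foldl pvStep PySem.Dict.empty from List.foldl_map.symm]
  have hstep2 : pvStep = fun (d : PySem.Dict String Int) p => d.insert p.1 (d.getD p.1 0 + p.2) := by
    funext d p; exact pvStep_eq d p
  rw [hstep2]
  set FA := pairs.foldl (fun (d : PySem.Dict String Int) p => d.insert p.1 (d.getD p.1 0 + p.2)) PySem.Dict.empty with hFA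
  have hndA : FA.keys.Nodup := by
    apply PySem.Dict.nodup_keys_foldl_insert_key
    simp [PySem.Dict.keys_empty]
  rw [PySem.Dict.items_eq_map_keys FA hndA 0]
  -- B side: the order-building loop yields the same key list as A's dict keys
  have hkA : FA.keys = PySem.Set.update [] (pairs.map Prod.fst) := by
    rw [hFA, PySem.Dict.keys_foldl_insert_key, PySem.Dict.keys_empty]
  have horder : pairs.foldl (fun order p => PySem.Set.add order p.1) PySem.Set.empty
      = PySem.Set.update [] (pairs.map Prod.fst) := by
    rw [PySem.Set.update]
    exact (List.foldl_map).symm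
  show List.map (fun k => (k, FA.getD k 0)) FA.keys
      = (pairs.foldl (fun order p => PySem.Set.add order p.1) PySem.Set.empty).map
          (fun s => (s, ((pairs.filter (fun t => t.1 == s)).map (fun t => t.2)).sum))
  rw [hkA, horder]
  apply List.map_congr_left
  intro s _
  have hvA := pvGetD_fold pairs PySem.Dict.empty s
  rw [hFA, hvA]
  simp only [PySem.Dict.getD_empty, zero_add]
  rw [pvFoldl_add_eq_sum]

-- ===== VERDICT (by name: the statement is the Claim_ definition above) =====
theorem convert_ancilla_bit_results_spec : Claim_equal_convert_ancilla_bit_results := by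
  intro results nfeatures _
  unfold Spec_convert_ancilla_bit_results
  exact convert_A_eq results nfeatures
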